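-- pv_equiv track=rewrite | github.com/punk-but-dead/SNP_lookup | main.py | replace_with_mapping
-- ===== SOURCE A (Python) =====
-- def replace_with_mapping(input_str, mappings):
--         """
--         Replace substrings in `input_str` based on `mappings` dict.
--         Longer keys in `mappings` are matched before shorter ones.
--
--         :param input_str: The original string to process
--         :param mappings: A dictionary mapping substrings to replacement symbols
--         :return: Transformed string with replacements
--         """
--         result = []
--         i = 0
--         sorted_keys = sorted(mappings.keys(), key=len, reverse=True)  # prioritize longer matches
--         if isinstance(input_str, float):
--             input_str = ""
--         while i < len(input_str):
--             matched = False
--             for key in sorted_keys: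
--                 if input_str.startswith(key, i):
--                     result.append(mappings[key])
--                     i += len(key)
--                     matched = True
--                     break
--             if not matched:
--                 # If no match, just add the original character
--                 result.append(input_str[i])
--                 i += 1
--
--         return ''.join(result)
-- ===== SOURCE B (Python) =====
-- def replace_with_mapping(input_str, mappings):
--     """Trie-based longest-match replacement: build a character trie of the keys once,
--     then at each position walk the trie to find the longest matching key."""
--     if isinstance(input_str, float):
--         input_str = ""
--     # flat trie: children[node] maps a char to a child node index; vals[node] is the
--     # replacement if the path to `node` spells a key, else None
--     children = [{}]
--     vals = [None]
--     for key, val in mappings.items():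
--         cur = 0
--         for ch in key:
--             nxt = children[cur].get(ch)
--             if nxt is None:
--                 nxt = len(children)
--                 children[cur][ch] = nxt
--                 children.append({})
--                 vals.append(None)
--             cur = nxt
--         vals[cur] = val
--     out = []
--     n = len(input_str)
--     i = 0
--     while i < n:
--         cur = 0
--         j = i
--         best = None
--         while j < n:
--             nxt = children[cur].get(input_str[j])
--             if nxt is None:
--                 break
--             cur = nxt
--             j += 1
--             if vals[cur] is not None:
--                 best = (j, vals[cur])
--         if best is None:
--             out.append(input_str[i])
--             i += 1
--         else:
--             out.append(best[1])
--             i = best[0]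
--     return ''.join(out)
-- ===== Notes on version B (the rewrite author's own statement) =====
-- stated objective: faster
-- what changed: B builds a character trie of the keys once (flat node list with per-node child dicts and terminal values) and at each position walks the trie along the input to find the longest matching key, instead of A's scan over all length-sorted keys at every position.
-- outside the precondition, e.g. on replace_with_mapping('x', {'': 'Y'}): A does not finish within the time limit, B returns 'x'; on replace_with_mapping('ab', {'ab': 'Z', '': 'Y'}): A returns 'Z', B returns 'Z'
import Mathlib
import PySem

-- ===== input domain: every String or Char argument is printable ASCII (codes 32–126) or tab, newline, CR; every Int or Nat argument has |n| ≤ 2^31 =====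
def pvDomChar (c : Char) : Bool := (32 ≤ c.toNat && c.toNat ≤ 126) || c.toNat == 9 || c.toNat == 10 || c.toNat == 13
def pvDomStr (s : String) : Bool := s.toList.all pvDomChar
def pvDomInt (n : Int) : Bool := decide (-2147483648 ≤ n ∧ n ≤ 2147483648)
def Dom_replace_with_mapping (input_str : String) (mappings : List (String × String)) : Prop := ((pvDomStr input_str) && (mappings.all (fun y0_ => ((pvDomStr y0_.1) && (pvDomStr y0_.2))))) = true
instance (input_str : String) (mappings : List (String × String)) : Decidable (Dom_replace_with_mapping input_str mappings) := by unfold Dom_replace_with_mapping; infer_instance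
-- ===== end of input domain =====

-- B builds a character trie of the keys once and, at each position, walks the trie to find the
-- longest matching key, instead of A's scan over all sorted keys at every position (objective: faster).

-- ===== PORT A =====
-- The while-loop of A: index i, accumulator `result`; fuel = len(input_str) is enough because
-- under Pre_ every iteration advances i by at least 1 (all keys are nonempty).
-- `input_str.startswith(key, i)` is ported exactly as PySem.Chars.startswith on the drop-i suffix;
-- the inner `for key in sorted_keys: … break` is the first key matching, i.e. List.find?;
-- `mappings[key]` is d.getD k "" (key is always present when looked up);
-- `''.join(result)` is the concatenation of the accumulated strings.
def replace_with_mapping_go (cs : List Char) (sortedKeys : List String)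
    (d : PySem.Dict String String) : Nat → Nat → List String → List String
  | 0, _, acc => acc
  | fuel+1, i, acc =>
    if h : i < cs.length then
      match sortedKeys.find? (fun k => PySem.Chars.startswith (cs.drop i) k.toList) with
      | some k => replace_with_mapping_go cs sortedKeys d fuel (i + k.toList.length)
                    (acc ++ [d.getD k ""])
      | none   => replace_with_mapping_go cs sortedKeys d fuel (i + 1)
                    (acc ++ [String.ofList [cs[i]]])
    else acc

def replace_with_mapping (input_str : String) (mappings : List (String × String)) : String :=
  let d := PySem.Dict.ofList mappings
  let sortedKeys := PySem.List.sorted d.keys (fun k => PySem.Str.len k) true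
  let cs := input_str.toList
  String.ofList ((replace_with_mapping_go cs sortedKeys d cs.length 0 []).flatMap String.toList)

-- ===== PORT B =====
-- B's trie: `children` is the flat node list (node ↦ dict from char to child index), `vals` the
-- parallel list of terminal values; node 0 is the root. trieAddKey is the inner `for ch in key`
-- loop of Source B (appending fresh nodes); trieWalk is the inner `while j < n` walk recorded as
-- recursion on the remaining suffix (rest = input[j:]); the outer while-loop gets fuel =
-- len(input_str) — enough because every iteration advances i by at least 1.
def trieAddKey : List (PySem.Dict Char Nat) → List (Option String) → Nat → List Char → String →
    List (PySem.Dict Char Nat) × List (Option String)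
  | children, vals, cur, [], v => (children, vals.set cur (some v))
  | children, vals, cur, c :: rest, v =>
    match (children.getD cur PySem.Dict.empty).get? c with
    | some nxt => trieAddKey children vals nxt rest v
    | none =>
      trieAddKey (children.modify cur (fun d => d.insert c children.length) ++ [PySem.Dict.empty])
        (vals ++ [none]) children.length rest v

def trieWalk (children : List (PySem.Dict Char Nat)) (vals : List (Option String)) :
    List Char → Nat → Nat → Option (Nat × String) → Option (Nat × String)
  | [], _, _, best => best
  | c :: rest, j, cur, best =>
    match (children.getD cur PySem.Dict.empty).get? c with
    | none => best
    | some nxt =>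
      trieWalk children vals rest (j + 1) nxt
        (match vals.getD nxt none with
         | some v => some (j + 1, v)
         | none => best)

def replace_with_mapping_alt_go (cs : List Char) (children : List (PySem.Dict Char Nat))
    (vals : List (Option String)) : Nat → Nat → List String → List String
  | 0, _, acc => acc
  | fuel+1, i, acc =>
    if h : i < cs.length then
      match trieWalk children vals (cs.drop i) i 0 none with
      | some (j, v) => replace_with_mapping_alt_go cs children vals fuel j (acc ++ [v])
      | none => replace_with_mapping_alt_go cs children vals fuel (i + 1)
                  (acc ++ [String.ofList [cs[i]]])
    else acc

def replace_with_mapping_alt (input_str : String) (mappings : List (String × String)) : String :=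
  let d := PySem.Dict.ofList mappings
  let trie := d.items.foldl (fun cv p => trieAddKey cv.1 cv.2 0 p.1.toList p.2)
      ([PySem.Dict.empty], [none])
  let cs := input_str.toList
  String.ofList ((replace_with_mapping_alt_go cs trie.1 trie.2 cs.length 0 []).flatMap String.toList)

-- ===== PRECONDITION & SPEC =====
-- Pre_ excludes inputs with an empty-string key (when the input string is nonempty): there A's
-- while-loop spins forever (startswith("") always matches and i += 0) as soon as position i has no
-- longer key matching; on the few such inputs where a longer match always fires A does return, and
-- the region is excluded as a whole.
def Pre_replace_with_mapping (input_str : String) (mappings : List (String × String)) : Prop :=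
  input_str = "" ∨ ∀ p ∈ mappings, p.1 ≠ ""
instance (input_str : String) (mappings : List (String × String)) : Decidable (Pre_replace_with_mapping input_str mappings) := by unfold Pre_replace_with_mapping; infer_instance

def pvWitness_replace_with_mapping : String × (List (String × String)) :=
  ("aabcab", [("ab", "X"), ("aab", "YY"), ("c", "")])

def Spec_replace_with_mapping (input_str : String) (mappings : List (String × String)) (out : String) : Prop := out = replace_with_mapping_alt input_str mappings
instance (input_str : String) (mappings : List (String × String)) (out : String) : Decidable (Spec_replace_with_mapping input_str mappings out) := by unfold Spec_replace_with_mapping; infer_instance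

-- ===== CLAIM (what is proved, stated in full; the proofs are below) =====
def Claim_equal_replace_with_mapping : Prop := ∀ (input_str : String) (mappings : List (String × String)), Dom_replace_with_mapping input_str mappings → Pre_replace_with_mapping input_str mappings → Spec_replace_with_mapping input_str mappings (replace_with_mapping input_str mappings)

-- ===== LEMMAS AND PROOFS =====

-- `pvFollow ch cur s` follows the trie edges spelling s from node cur (none = missing edge).
def pvFollow (ch : List (PySem.Dict Char Nat)) : Nat → List Char → Option Nat
  | cur, [] => some cur
  | cur, c :: s =>
    match (ch.getD cur PySem.Dict.empty).get? c with
    | some nxt => pvFollow ch nxt s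
    | none => none

-- terminal value stored at the node reached by s from the root
def pvTermVal (ch : List (PySem.Dict Char Nat)) (vals : List (Option String)) (s : List Char) :
    Option String :=
  (pvFollow ch 0 s).bind (fun j => vals.getD j none)

-- trie well-formedness: parallel lengths, nonempty, edge targets in range, paths are unique
def pvEdgeOk (ch : List (PySem.Dict Char Nat)) : Prop :=
  ∀ k : Nat, ∀ p ∈ (ch.getD k PySem.Dict.empty).items, p.2 < ch.length

def pvInv (ch : List (PySem.Dict Char Nat)) (vals : List (Option String)) : Prop :=
  vals.length = ch.length ∧ 0 < ch.length ∧ pvEdgeOk ch ∧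
  ∀ s t j, pvFollow ch 0 s = some j → pvFollow ch 0 t = some j → s = t

-- the value the finished trie must store at s: the LAST pair of `items` whose key spells s
def pvLastVal (items : List (String × String)) (s : List Char) : Option String :=
  (items.reverse.find? (fun p => decide (p.1.toList = s))).map Prod.snd

theorem pvFollow_append (ch : List (PySem.Dict Char Nat)) (s t : List Char) :
    ∀ cur, pvFollow ch cur (s ++ t) = (pvFollow ch cur s).bind (fun j => pvFollow ch j t) := by
  induction s with
  | nil => intro cur; simp [pvFollow]
  | cons c s ih =>
    intro cur
    simp only [List.cons_append, pvFollow]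
    cases (ch.getD cur PySem.Dict.empty).get? c with
    | none => simp
    | some nxt => simpa using ih nxt

theorem pvFollow_lt (ch : List (PySem.Dict Char Nat)) (he : pvEdgeOk ch) :
    ∀ (s : List Char) (cur j : Nat), cur < ch.length → pvFollow ch cur s = some j →
      j < ch.length := by
  intro s
  induction s with
  | nil => intro cur j hc hf; cases hf; exact hc
  | cons c s ih =>
    intro cur j hc hf
    simp only [pvFollow] at hf
    cases hg : (ch.getD cur PySem.Dict.empty).get? c with
    | none => rw [hg] at hf; cases hf
    | some nxt =>
      rw [hg] at hf
      have hmem : (c, nxt) ∈ (ch.getD cur PySem.Dict.empty).items :=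
        PySem.Dict.mem_items_of_get?_eq_some _ hg
      exact ih nxt j (he cur _ hmem) hf


theorem pv_append_shift {α : Type} (q : List α) (c : α) (l : List α) :
    q ++ c :: l = (q ++ [c]) ++ l := by simp

-- ----- the three node dicts of the extended trie -----
theorem pvNode_cur (ch : List (PySem.Dict Char Nat)) (cur : Nat) (c : Char)
    (hc : cur < ch.length) :
    (ch.modify cur (fun d => d.insert c ch.length) ++ [PySem.Dict.empty]).getD cur PySem.Dict.empty
      = (ch.getD cur PySem.Dict.empty).insert c ch.length := by
  have h1 : cur < (ch.modify cur (fun d => d.insert c ch.length)).length := by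
    simpa [List.length_modify] using hc
  rw [List.getD_append _ _ _ _ h1, List.getD_eq_getElem?_getD, List.getElem?_modify,
    List.getD_eq_getElem?_getD]
  rcases List.getElem?_eq_some_iff.mpr ⟨hc, rfl⟩ with h
  rw [h]
  simp

theorem pvNode_new (ch : List (PySem.Dict Char Nat)) (cur : Nat) (c : Char) :
    (ch.modify cur (fun d => d.insert c ch.length) ++ [PySem.Dict.empty]).getD ch.length
      PySem.Dict.empty = PySem.Dict.empty := by
  rw [List.getD_eq_getElem?_getD]
  have : (ch.modify cur (fun d => d.insert c ch.length) ++ [PySem.Dict.empty])[ch.length]?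
      = some PySem.Dict.empty := by
    rw [List.getElem?_append_right (by simp [List.length_modify])]
    simp [List.length_modify]
  rw [this]
  rfl

theorem pvNode_old (ch : List (PySem.Dict Char Nat)) (cur : Nat) (c : Char) (k : Nat)
    (hk : k < ch.length) (hne : k ≠ cur) :
    (ch.modify cur (fun d => d.insert c ch.length) ++ [PySem.Dict.empty]).getD k PySem.Dict.empty
      = ch.getD k PySem.Dict.empty := by
  have h1 : k < (ch.modify cur (fun d => d.insert c ch.length)).length := by
    simpa [List.length_modify] using hk
  rw [List.getD_append _ _ _ _ h1, List.getD_eq_getElem?_getD, List.getElem?_modify,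
    List.getD_eq_getElem?_getD]
  have hcc : ¬ (cur = k) := fun h => hne h.symm
  cases h : ch[k]? with
  | none => simp
  | some dk => simp [hcc]

-- ----- simulation: old paths survive the extension -----
theorem pvSim_fwd (ch : List (PySem.Dict Char Nat)) (cur : Nat) (c : Char)
    (he : pvEdgeOk ch) (hedge : (ch.getD cur PySem.Dict.empty).get? c = none) :
    ∀ (s : List Char) (k r : Nat), k < ch.length → pvFollow ch k s = some r →
      pvFollow (ch.modify cur (fun d => d.insert c ch.length) ++ [PySem.Dict.empty]) k s
        = some r := by
  intro s
  induction s with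
  | nil => intro k r _ hf; exact hf
  | cons c' s ih =>
    intro k r hk hf
    simp only [pvFollow] at hf ⊢
    cases hg : (ch.getD k PySem.Dict.empty).get? c' with
    | none => rw [hg] at hf; cases hf
    | some nxt =>
      rw [hg] at hf
      have hnxt : nxt < ch.length :=
        he k _ (PySem.Dict.mem_items_of_get?_eq_some _ hg)
      have hnew : ((ch.modify cur (fun d => d.insert c ch.length)
          ++ [PySem.Dict.empty]).getD k PySem.Dict.empty).get? c' = some nxt := by
        by_cases hkc : k = cur
        · subst hkc
          rw [pvNode_cur ch k c hk, PySem.Dict.get?_insert]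
          have hcc : ¬ (c' = c) := by
            intro h; rw [h, hedge] at hg; cases hg
          rw [if_neg hcc]
          exact hg
        · rw [pvNode_old ch cur c k hk hkc, hg]
      rw [hnew]
      exact ih nxt r hnxt hf

theorem pvSim_new_node (ch : List (PySem.Dict Char Nat)) (cur : Nat) (c : Char) :
    ∀ (s : List Char) (r : Nat),
      pvFollow (ch.modify cur (fun d => d.insert c ch.length) ++ [PySem.Dict.empty])
        ch.length s = some r → s = [] ∧ r = ch.length := by
  intro s r hf
  cases s with
  | nil => cases hf; exact ⟨rfl, rfl⟩
  | cons c' s =>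
    simp [pvFollow, PySem.Dict.get?_empty] at hf

theorem pvSim_bwd (ch : List (PySem.Dict Char Nat)) (cur : Nat) (c : Char)
    (he : pvEdgeOk ch) (hedge : (ch.getD cur PySem.Dict.empty).get? c = none) :
    ∀ (s : List Char) (k r : Nat), k < ch.length →
      pvFollow (ch.modify cur (fun d => d.insert c ch.length) ++ [PySem.Dict.empty]) k s
        = some r →
      pvFollow ch k s = some r ∨
        ∃ q, pvFollow ch k q = some cur ∧ s = q ++ [c] ∧ r = ch.length := by
  intro s
  induction s with
  | nil => intro k r _ hf; exact Or.inl hf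
  | cons c' s ih =>
    intro k r hk hf
    simp only [pvFollow] at hf
    by_cases hkc : k = cur
    · subst hkc
      rw [pvNode_cur ch k c hk, PySem.Dict.get?_insert] at hf
      by_cases hcc : c' = c
      · subst hcc
        rw [if_pos rfl] at hf
        rcases pvSim_new_node ch k c' s r hf with ⟨rfl, rfl⟩
        exact Or.inr ⟨[], by simp [pvFollow]⟩
      · rw [if_neg hcc] at hf
        cases hg : (ch.getD k PySem.Dict.empty).get? c' with
        | none => rw [hg] at hf; cases hf
        | some nxt =>
          rw [hg] at hf
          have hnxt : nxt < ch.length :=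
            he k _ (PySem.Dict.mem_items_of_get?_eq_some _ hg)
          rcases ih nxt r hnxt hf with h | ⟨q, hq, rfl, rfl⟩
          · exact Or.inl (by simp only [pvFollow, hg]; exact h)
          · exact Or.inr ⟨c' :: q, by simp only [pvFollow, hg]; exact hq, by simp, rfl⟩
    · rw [pvNode_old ch cur c k hk hkc] at hf
      cases hg : (ch.getD k PySem.Dict.empty).get? c' with
      | none => rw [hg] at hf; cases hf
      | some nxt =>
        rw [hg] at hf
        have hnxt : nxt < ch.length :=
          he k _ (PySem.Dict.mem_items_of_get?_eq_some _ hg)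
        rcases ih nxt r hnxt hf with h | ⟨q, hq, rfl, rfl⟩
        · exact Or.inl (by simp only [pvFollow, hg]; exact h)
        · exact Or.inr ⟨c' :: q, by simp only [pvFollow, hg]; exact hq, by simp, rfl⟩

-- ----- the fresh-node extension preserves the invariant and every terminal value -----
theorem pvExtend (ch : List (PySem.Dict Char Nat)) (vals : List (Option String))
    (cur : Nat) (c : Char) (p : List Char) (hinv : pvInv ch vals)
    (hcur : pvFollow ch 0 p = some cur)
    (hedge : (ch.getD cur PySem.Dict.empty).get? c = none) :
    pvInv (ch.modify cur (fun d => d.insert c ch.length) ++ [PySem.Dict.empty])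
      (vals ++ [none]) ∧
    (∀ s, pvTermVal (ch.modify cur (fun d => d.insert c ch.length) ++ [PySem.Dict.empty])
        (vals ++ [none]) s = pvTermVal ch vals s) ∧
    pvFollow (ch.modify cur (fun d => d.insert c ch.length) ++ [PySem.Dict.empty]) 0 (p ++ [c])
      = some ch.length := by
  obtain ⟨hlen, hpos, he, hinj⟩ := hinv
  have hc : cur < ch.length := pvFollow_lt ch he p 0 cur hpos hcur
  set ch' := ch.modify cur (fun d => d.insert c ch.length) ++ [PySem.Dict.empty] with hch'
  have hlen' : ch'.length = ch.length + 1 := by simp [hch', List.length_modify]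
  -- top-level backward simulation using injectivity
  have bwd : ∀ s r, pvFollow ch' 0 s = some r →
      pvFollow ch 0 s = some r ∨ (s = p ++ [c] ∧ r = ch.length) := by
    intro s r hf
    rcases pvSim_bwd ch cur c he hedge s 0 r hpos hf with h | ⟨q, hq, rfl, rfl⟩
    · exact Or.inl h
    · exact Or.inr ⟨by rw [hinj q p cur hq hcur], rfl⟩
  have fwd : ∀ s r, pvFollow ch 0 s = some r → pvFollow ch' 0 s = some r :=
    fun s r h => pvSim_fwd ch cur c he hedge s 0 r hpos h
  have hfnew : pvFollow ch' 0 (p ++ [c]) = some ch.length := by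
    rw [pvFollow_append, fwd p cur hcur]
    simp only [Option.bind_some, pvFollow, hch']
    rw [pvNode_cur ch cur c hc, PySem.Dict.get?_insert]
    simp
  refine ⟨⟨?_, ?_, ?_, ?_⟩, ?_, hfnew⟩
  · simp [hch', hlen, List.length_modify]
  · omega
  · -- edges of ch' stay in range
    intro k pr hpr
    rw [hlen']
    by_cases hkc : k = cur
    · subst hkc
      rw [hch', pvNode_cur ch k c hc] at hpr
      have hcont : (ch.getD k PySem.Dict.empty).contains c = false := by
        rw [PySem.Dict.contains_eq_isSome_get?, hedge]; rfl
      rw [PySem.Dict.items_insert_of_not_contains _ _ hcont] at hpr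
      rcases List.mem_append.mp hpr with h | h
      · exact Nat.lt_succ_of_lt (he k pr h)
      · rcases List.mem_singleton.mp h with rfl
        exact Nat.lt_succ_self _
    · by_cases hkl : k < ch.length
      · rw [hch', pvNode_old ch cur c k hkl hkc] at hpr
        exact Nat.lt_succ_of_lt (he k pr hpr)
      · by_cases hke : k = ch.length
        · subst hke
          rw [hch', pvNode_new ch cur c,
            show (PySem.Dict.empty : PySem.Dict Char Nat).items = [] from rfl] at hpr
          simp at hpr
        · have : ch'.getD k PySem.Dict.empty = PySem.Dict.empty := by
            rw [List.getD_eq_getElem?_getD, List.getElem?_eq_none]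
            · rfl
            · rw [hlen']; omega
          rw [this, show (PySem.Dict.empty : PySem.Dict Char Nat).items = [] from rfl] at hpr
          simp at hpr
  · -- injectivity of ch'
    intro s t j hs ht
    rcases bwd s j hs with h1 | ⟨hs1, hs2⟩
    · rcases bwd t j ht with h2 | ⟨ht1, ht2⟩
      · exact hinj s t j h1 h2
      · subst ht2
        exact absurd (pvFollow_lt ch he s 0 _ hpos h1) (lt_irrefl _)
    · rcases bwd t j ht with h2 | ⟨ht1, ht2⟩
      · subst hs2
        exact absurd (pvFollow_lt ch he t 0 _ hpos h2) (lt_irrefl _)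
      · rw [hs1, ht1]
  · -- terminal values unchanged
    intro s
    unfold pvTermVal
    cases h : pvFollow ch' 0 s with
    | none =>
      cases h2 : pvFollow ch 0 s with
      | none => rfl
      | some r => rw [fwd s r h2] at h; cases h
    | some j =>
      rcases bwd s j h with h2 | ⟨rfl, rfl⟩
      · rw [h2]
        have hj : j < vals.length := hlen ▸ pvFollow_lt ch he s 0 j hpos h2
        simp only [Option.bind_some]
        rw [List.getD_append _ _ _ _ hj]
      · have h2 : pvFollow ch 0 (p ++ [c]) = none := by
          rw [pvFollow_append, hcur]
          simp only [Option.bind_some, pvFollow, hedge]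
        rw [h2]
        simp only [Option.bind_some, Option.bind_none]
        rw [List.getD_eq_getElem?_getD]
        have : (vals ++ [none])[ch.length]? = some (none : Option String) := by
          rw [List.getElem?_append_right (by omega)]
          simp [hlen]
        rw [this]
        rfl

-- ----- inserting one key: sets exactly its own terminal value -----
theorem trieAddKey_spec : ∀ (ks : List Char) (ch : List (PySem.Dict Char Nat))
    (vals : List (Option String)) (cur : Nat) (p : List Char) (v : String),
    pvInv ch vals → pvFollow ch 0 p = some cur →
    pvInv (trieAddKey ch vals cur ks v).1 (trieAddKey ch vals cur ks v).2 ∧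
    (∀ s, s ≠ p ++ ks → pvTermVal (trieAddKey ch vals cur ks v).1
        (trieAddKey ch vals cur ks v).2 s = pvTermVal ch vals s) ∧
    pvTermVal (trieAddKey ch vals cur ks v).1 (trieAddKey ch vals cur ks v).2 (p ++ ks)
      = some v := by
  intro ks
  induction ks with
  | nil =>
    intro ch vals cur p v hinv hcur
    obtain ⟨hlen, hpos, he, hinj⟩ := hinv
    have hc : cur < ch.length := pvFollow_lt ch he p 0 cur hpos hcur
    simp only [trieAddKey, List.append_nil]
    refine ⟨⟨by simp [hlen], hpos, he, hinj⟩, ?_, ?_⟩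
    · intro s hs
      unfold pvTermVal
      cases h : pvFollow ch 0 s with
      | none => rfl
      | some j =>
        have hj : j ≠ cur := fun hjc => hs (hinj s p cur (hjc ▸ h) hcur)
        simp only [Option.bind_some]
        rw [List.getD_eq_getElem?_getD, List.getD_eq_getElem?_getD,
          List.getElem?_set_ne (fun hh => hj hh.symm)]
    · unfold pvTermVal
      rw [hcur]
      simp only [Option.bind_some]
      have hcv : cur < vals.length := by omega
      simp [List.getD_eq_getElem?_getD, hcv]
  | cons c ks ih =>
    intro ch vals cur p v hinv hcur
    cases hg : (ch.getD cur PySem.Dict.empty).get? c with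
    | some nxt =>
      have hstep : pvFollow ch 0 (p ++ [c]) = some nxt := by
        rw [pvFollow_append, hcur]
        simp only [Option.bind_some, pvFollow, hg]
      have heq : trieAddKey ch vals cur (c :: ks) v = trieAddKey ch vals nxt ks v := by
        simp only [trieAddKey, hg]
      rw [heq, pv_append_shift p c ks]
      exact ih ch vals nxt (p ++ [c]) v hinv hstep
    | none =>
      obtain ⟨hext, hpres, hfnew⟩ := pvExtend ch vals cur c p hinv hcur hg
      have heq : trieAddKey ch vals cur (c :: ks) v
          = trieAddKey (ch.modify cur (fun d => d.insert c ch.length) ++ [PySem.Dict.empty])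
              (vals ++ [none]) ch.length ks v := by
        simp only [trieAddKey, hg]
      rw [heq, pv_append_shift p c ks]
      obtain ⟨hinv2, hpres2, hset2⟩ := ih _ _ ch.length (p ++ [c]) v hext hfnew
      refine ⟨hinv2, ?_, hset2⟩
      intro s hs
      rw [hpres2 s hs, hpres s]

-- ----- building the whole trie -----
theorem pvBuild_go : ∀ (items : List (String × String)) (ch : List (PySem.Dict Char Nat))
    (vals : List (Option String)), pvInv ch vals →
    pvInv (items.foldl (fun cv p => trieAddKey cv.1 cv.2 0 p.1.toList p.2) (ch, vals)).1
      (items.foldl (fun cv p => trieAddKey cv.1 cv.2 0 p.1.toList p.2) (ch, vals)).2 ∧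
    ∀ s, pvTermVal (items.foldl (fun cv p => trieAddKey cv.1 cv.2 0 p.1.toList p.2) (ch, vals)).1
        (items.foldl (fun cv p => trieAddKey cv.1 cv.2 0 p.1.toList p.2) (ch, vals)).2 s
      = (pvLastVal items s).or (pvTermVal ch vals s) := by
  intro items
  induction items with
  | nil =>
    intro ch vals hinv
    exact ⟨hinv, fun s => by simp [pvLastVal]⟩
  | cons pr items ih =>
    intro ch vals hinv
    have hroot : pvFollow ch 0 [] = some 0 := rfl
    obtain ⟨hinv1, hpres1, hset1⟩ := trieAddKey_spec pr.1.toList ch vals 0 [] pr.2 hinv hroot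
    simp only [List.nil_append] at hpres1 hset1
    obtain ⟨hinv2, hval2⟩ := ih _ _ hinv1
    refine ⟨by simpa using hinv2, ?_⟩
    intro s
    have hstep : (pr :: items).foldl (fun cv p => trieAddKey cv.1 cv.2 0 p.1.toList p.2) (ch, vals)
        = items.foldl (fun cv p => trieAddKey cv.1 cv.2 0 p.1.toList p.2)
            (trieAddKey ch vals 0 pr.1.toList pr.2) := by
      simp [List.foldl_cons]
    rw [hstep]
    have hv := hval2 s
    have hlast : pvLastVal (pr :: items) s
        = (pvLastVal items s).or (if pr.1.toList = s then some pr.2 else none) := by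
      unfold pvLastVal
      rw [List.reverse_cons, List.find?_append]
      cases h : (items.reverse.find? fun p => decide (p.1.toList = s)) with
      | none => simp [List.find?, Option.or]; split_ifs with hh <;> simp [hh]
      | some x => simp [Option.or]
    rw [hlast]
    by_cases hps : pr.1.toList = s
    · subst hps
      rw [hv]
      cases h : pvLastVal items pr.1.toList with
      | none => simp [Option.or, hset1]
      | some w => simp [Option.or]
    · rw [hv, hpres1 s (fun hh => hps hh.symm)]
      simp [if_neg hps]

-- the root-only trie is well formed and stores nothing
theorem pvInv_init : pvInv [PySem.Dict.empty] [none] := by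
  refine ⟨rfl, by simp, ?_, ?_⟩
  · intro k pr hpr
    have : ([PySem.Dict.empty] : List (PySem.Dict Char Nat)).getD k PySem.Dict.empty
        = PySem.Dict.empty := by
      cases k with
      | zero => rfl
      | succ k => rfl
    rw [this, show (PySem.Dict.empty : PySem.Dict Char Nat).items = [] from rfl] at hpr
    simp at hpr
  · intro s t j hs ht
    cases s with
    | nil =>
      cases t with
      | nil => rfl
      | cons c t => simp [pvFollow, PySem.Dict.get?_empty] at ht
    | cons c s => simp [pvFollow, PySem.Dict.get?_empty] at hs

theorem pvTermVal_init : ∀ s, pvTermVal [PySem.Dict.empty] [none] s = none := by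
  intro s
  cases s with
  | nil => rfl
  | cons c s => simp [pvTermVal, pvFollow, PySem.Dict.get?_empty]

-- ----- the reference scan and the trie walk -----
def pvScan (T : List Char → Option String) : List Char → List Char → Nat →
    Option (Nat × String) → Option (Nat × String)
  | _, [], _, best => best
  | q, c :: rest, j, best =>
    pvScan T (q ++ [c]) rest (j + 1)
      (match T (q ++ [c]) with
       | some v => some (j + 1, v)
       | none => best)

theorem pvScan_dead (ch : List (PySem.Dict Char Nat)) (vals : List (Option String)) :
    ∀ (rest q : List Char) (j : Nat) (best : Option (Nat × String)),
      pvFollow ch 0 q = none →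
      pvScan (pvTermVal ch vals) q rest j best = best := by
  intro rest
  induction rest with
  | nil => intro q j best _; rfl
  | cons c rest ih =>
    intro q j best hq
    have hq' : pvFollow ch 0 (q ++ [c]) = none := by
      rw [pvFollow_append, hq]; rfl
    have hT : pvTermVal ch vals (q ++ [c]) = none := by
      unfold pvTermVal; rw [hq']; rfl
    simp only [pvScan, hT]
    exact ih (q ++ [c]) (j + 1) best hq'

theorem pvWalk_eq_scan (ch : List (PySem.Dict Char Nat)) (vals : List (Option String)) :
    ∀ (rest q : List Char) (j cur : Nat) (best : Option (Nat × String)),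
      pvFollow ch 0 q = some cur →
      trieWalk ch vals rest j cur best = pvScan (pvTermVal ch vals) q rest j best := by
  intro rest
  induction rest with
  | nil => intro q j cur best _; rfl
  | cons c rest ih =>
    intro q j cur best hq
    simp only [trieWalk, pvScan]
    cases hg : (ch.getD cur PySem.Dict.empty).get? c with
    | none =>
      have hq' : pvFollow ch 0 (q ++ [c]) = none := by
        rw [pvFollow_append, hq]
        simp only [Option.bind_some, pvFollow, hg]
      have hT : pvTermVal ch vals (q ++ [c]) = none := by
        unfold pvTermVal; rw [hq']; rfl
      rw [hT]
      exact (pvScan_dead ch vals rest (q ++ [c]) (j + 1) best hq').symm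
    | some nxt =>
      have hq' : pvFollow ch 0 (q ++ [c]) = some nxt := by
        rw [pvFollow_append, hq]
        simp only [Option.bind_some, pvFollow, hg]
      have hT : pvTermVal ch vals (q ++ [c]) = vals.getD nxt none := by
        unfold pvTermVal; rw [hq']; rfl
      rw [hT]
      exact ih (q ++ [c]) (j + 1) nxt _ hq'

theorem pvScan_none (T : List Char → Option String) :
    ∀ (rest q : List Char) (j : Nat) (best : Option (Nat × String)),
      (∀ d, 1 ≤ d → d ≤ rest.length → T (q ++ rest.take d) = none) →
      pvScan T q rest j best = best := by
  intro rest
  induction rest with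
  | nil => intro q j best _; rfl
  | cons c rest ih =>
    intro q j best h
    have h1 : T (q ++ [c]) = none := by
      have := h 1 (le_refl _) (by simp)
      simpa using this
    simp only [pvScan, h1]
    refine ih (q ++ [c]) (j + 1) best ?_
    intro d hd1 hdl
    have h2 := h (d + 1) (by omega) (by simp [List.length_cons]; omega)
    rw [List.take_succ_cons, pv_append_shift] at h2
    exact h2

theorem pvScan_hit (T : List Char → Option String) :
    ∀ (rest : List Char) (dm : Nat) (q : List Char) (j : Nat) (best : Option (Nat × String))
      (v : String), 1 ≤ dm → dm ≤ rest.length → T (q ++ rest.take dm) = some v →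
      (∀ d, dm < d → d ≤ rest.length → T (q ++ rest.take d) = none) →
      pvScan T q rest j best = some (j + dm, v) := by
  intro rest
  induction rest with
  | nil =>
    intro dm q j best v h1 h2
    simp only [List.length_nil] at h2
    omega
  | cons c rest ih =>
    intro dm q j best v h1 h2 hv hnone
    match dm, h1 with
    | 1, _ =>
      have hv1 : T (q ++ [c]) = some v := by simpa using hv
      simp only [pvScan, hv1]
      rw [pvScan_none T rest (q ++ [c]) (j + 1) (some (j + 1, v)) ?_]
      intro d hd1 hdl
      have h2' := hnone (d + 1) (by omega) (by simp [List.length_cons]; omega)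
      rw [List.take_succ_cons, pv_append_shift] at h2'
      exact h2'
    | d' + 2, _ =>
      simp only [pvScan]
      have hres := ih (d' + 1) (q ++ [c]) (j + 1)
        (match T (q ++ [c]) with | some v => some (j + 1, v) | none => best) v
        (by omega) (by simp only [List.length_cons] at h2; omega)
        (by rw [List.take_succ_cons, pv_append_shift] at hv; exact hv)
        (by
          intro d hd1 hdl
          have h2' := hnone (d + 1) (by omega) (by simp [List.length_cons]; omega)
          rw [List.take_succ_cons, pv_append_shift] at h2'
          exact h2')
      rw [show j + (d' + 2) = j + 1 + (d' + 1) by omega]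
      exact hres

-- ----- keys of an association-list dict come from the list -----
theorem pv_mem_keys_update {κ ν : Type} [BEq κ] [LawfulBEq κ]
    (m : List (κ × ν)) : ∀ (d : PySem.Dict κ ν) (k : κ),
    k ∈ (d.update m).keys → k ∈ d.keys ∨ k ∈ m.map Prod.fst := by
  induction m with
  | nil => intro d k h; exact Or.inl h
  | cons p t ih =>
    intro d k h
    simp only [PySem.Dict.update, List.foldl_cons] at h ⊢
    rcases ih (d.insert p.1 p.2) k h with h' | h'
    · rcases (PySem.Dict.mem_keys_insert d p.1 k p.2).mp h' with rfl | h''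
      · exact Or.inr (by simp)
      · exact Or.inl h''
    · exact Or.inr (by simp [h'])

theorem pv_mem_keys_ofList {κ ν : Type} [BEq κ] [LawfulBEq κ]
    (m : List (κ × ν)) (k : κ) (h : k ∈ (PySem.Dict.ofList m).keys) : k ∈ m.map Prod.fst := by
  rcases pv_mem_keys_update m PySem.Dict.empty k h with h' | h'
  · simp [PySem.Dict.keys_empty] at h'
  · exact h'

-- first hit of find? in a list pairwise-descending under f is an f-maximal hit
theorem pv_find?_max {α : Type} (f : α → Nat) (p : α → Bool) :
    ∀ (xs : List α), xs.Pairwise (fun a b => f b ≤ f a) →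
    ∀ x, xs.find? p = some x → ∀ y ∈ xs, p y = true → f y ≤ f x := by
  intro xs
  induction xs with
  | nil => intro _ x hfind; simp at hfind
  | cons a t ih =>
    intro hpw x hfind y hy hpy
    rcases List.pairwise_cons.mp hpw with ⟨ha, ht⟩
    by_cases hpa : p a = true
    · rw [List.find?_cons_of_pos hpa] at hfind
      obtain rfl : a = x := Option.some.inj hfind
      rcases List.mem_cons.mp hy with rfl | hy
      · exact le_refl _
      · exact ha y hy
    · rw [List.find?_cons_of_neg (by simpa using hpa)] at hfind
      rcases List.mem_cons.mp hy with rfl | hy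
      · exact absurd hpy hpa
      · exact ih ht x hfind y hy hpy

-- ----- A-side characterisation: the first sorted key that matches is the longest prefix key -----
theorem pvA_none (mappings : List (String × String)) (rest : List Char)
    (hfa : (PySem.List.sorted (PySem.Dict.ofList mappings).keys (fun k => PySem.Str.len k)
        true).find? (fun k => PySem.Chars.startswith rest k.toList) = none) :
    ∀ d, 1 ≤ d → d ≤ rest.length →
      pvLastVal (PySem.Dict.ofList mappings).items (rest.take d) = none := by
  intro d _ _
  by_contra hne
  cases hL : pvLastVal (PySem.Dict.ofList mappings).items (rest.take d) with
  | none => exact hne hL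
  | some v =>
    unfold pvLastVal at hL
    cases hf : ((PySem.Dict.ofList mappings).items.reverse.find?
        fun p => decide (p.1.toList = rest.take d)) with
    | none => rw [hf] at hL; cases hL
    | some pr =>
      have hpr : pr ∈ (PySem.Dict.ofList mappings).items :=
        List.mem_reverse.mp (List.mem_of_find?_eq_some hf)
      have hpt : pr.1.toList = rest.take d := by
        have := List.find?_some hf; simpa using this
      have hkm : pr.1 ∈ (PySem.Dict.ofList mappings).keys :=
        List.mem_map.mpr ⟨pr, hpr, rfl⟩
      have hks : pr.1 ∈ PySem.List.sorted (PySem.Dict.ofList mappings).keys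
          (fun k => PySem.Str.len k) true := (PySem.List.mem_sorted _ _ _ _).mpr hkm
      have hstart : PySem.Chars.startswith rest pr.1.toList = true := by
        rw [PySem.Chars.startswith_iff, hpt]
        exact List.take_prefix d rest
      exact absurd hstart (by simpa using List.find?_eq_none.mp hfa _ hks)

theorem pvA_some (mappings : List (String × String)) (rest : List Char) (k : String)
    (hnn : ∀ k' ∈ (PySem.Dict.ofList mappings).keys, k' ≠ "")
    (hfa : (PySem.List.sorted (PySem.Dict.ofList mappings).keys (fun k => PySem.Str.len k)
        true).find? (fun k => PySem.Chars.startswith rest k.toList) = some k) :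
    1 ≤ k.toList.length ∧ k.toList.length ≤ rest.length ∧
    pvLastVal (PySem.Dict.ofList mappings).items (rest.take k.toList.length)
      = some ((PySem.Dict.ofList mappings).getD k "") ∧
    (∀ d, k.toList.length < d → d ≤ rest.length →
      pvLastVal (PySem.Dict.ofList mappings).items (rest.take d) = none) := by
  set dct := PySem.Dict.ofList mappings with hdct
  have hkS : k ∈ PySem.List.sorted dct.keys (fun k => PySem.Str.len k) true :=
    List.mem_of_find?_eq_some hfa
  have hkm : k ∈ dct.keys := (PySem.List.mem_sorted _ _ _ _).mp hkS
  have hne : k ≠ "" := hnn k hkm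
  have hnil : k.toList ≠ [] := by
    intro hh; apply hne
    have := congrArg String.ofList hh
    simpa [String.ofList_toList] using this
  have hpre : k.toList <+: rest := by
    have := List.find?_some hfa
    exact (PySem.Chars.startswith_iff _ _).mp (by simpa using this)
  have htake : rest.take k.toList.length = k.toList :=
    (List.prefix_iff_eq_take.mp hpre) ▸ rfl
  have hpw : (PySem.List.sorted dct.keys (fun k => PySem.Str.len k) true).Pairwise
      (fun a b => (fun s => s.toList.length) b ≤ (fun s => s.toList.length) a) := by
    have := PySem.List.sorted_pairwise_rev dct.keys (fun k => PySem.Str.len k)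
    refine this.imp ?_
    intro a b hab
    have := hab
    simp only [PySem.Str.len_eq] at this
    exact_mod_cast this
  refine ⟨by cases h : k.toList with
    | nil => exact absurd h hnil
    | cons a l => simp, hpre.length_le, ?_, ?_⟩
  · -- the stored value at k is the dict value
    rw [htake]
    have hnodup : dct.keys.Nodup := PySem.Dict.nodup_keys_ofList mappings
    obtain ⟨pr0, hpr0, hpr0k⟩ := List.mem_map.mp hkm
    have hsome : (dct.items.reverse.find? fun p => decide (p.1.toList = k.toList)).isSome := by
      rw [List.find?_isSome]
      exact ⟨pr0, List.mem_reverse.mpr hpr0, by simp [hpr0k]⟩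
    cases hf : (dct.items.reverse.find? fun p => decide (p.1.toList = k.toList)) with
    | none => rw [hf] at hsome; cases hsome
    | some pr =>
      have hprm : pr ∈ dct.items := List.mem_reverse.mp (List.mem_of_find?_eq_some hf)
      have hprt : pr.1.toList = k.toList := by
        have := List.find?_some hf; simpa using this
      have hpr1 : pr.1 = k := by
        have := congrArg String.ofList hprt
        simpa [String.ofList_toList] using this
      have hget : dct.get? pr.1 = some pr.2 :=
        PySem.Dict.get?_of_mem_items dct hprm hnodup
      have hgd : dct.getD k "" = pr.2 := by
        rw [← hpr1]
        exact PySem.Dict.getD_of_get?_eq_some dct "" hget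
      unfold pvLastVal
      rw [hf, hgd]
      rfl
  · -- no longer prefix is a key
    intro d hd hdl
    by_contra hne'
    cases hL : pvLastVal dct.items (rest.take d) with
    | none => exact hne' hL
    | some v =>
      unfold pvLastVal at hL
      cases hf : (dct.items.reverse.find? fun p => decide (p.1.toList = rest.take d)) with
      | none => rw [hf] at hL; cases hL
      | some pr =>
        have hprm : pr ∈ dct.items := List.mem_reverse.mp (List.mem_of_find?_eq_some hf)
        have hprt : pr.1.toList = rest.take d := by
          have := List.find?_some hf; simpa using this
        have hkm' : pr.1 ∈ dct.keys := List.mem_map.mpr ⟨pr, hprm, rfl⟩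
        have hkS' : pr.1 ∈ PySem.List.sorted dct.keys (fun k => PySem.Str.len k) true :=
          (PySem.List.mem_sorted _ _ _ _).mpr hkm'
        have hstart : PySem.Chars.startswith rest pr.1.toList = true := by
          rw [PySem.Chars.startswith_iff, hprt]
          exact List.take_prefix d rest
        have hle := pv_find?_max (fun s => s.toList.length)
          (fun k => PySem.Chars.startswith rest k.toList) _ hpw k hfa pr.1 hkS' hstart
        have hlen : pr.1.toList.length = d := by
          rw [hprt, List.length_take]; omega
        simp only [hlen] at hle
        omega

-- ----- the two outer loops agree step for step -----
theorem pv_go_eq (cs : List Char) (mappings : List (String × String))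
    (ch : List (PySem.Dict Char Nat)) (vals : List (Option String))
    (hval : ∀ s, pvTermVal ch vals s = pvLastVal (PySem.Dict.ofList mappings).items s)
    (hnn : ∀ k' ∈ (PySem.Dict.ofList mappings).keys, k' ≠ "") :
    ∀ fuel i acc,
      replace_with_mapping_go cs
        (PySem.List.sorted (PySem.Dict.ofList mappings).keys (fun k => PySem.Str.len k) true)
        (PySem.Dict.ofList mappings) fuel i acc
      = replace_with_mapping_alt_go cs ch vals fuel i acc := by
  intro fuel
  induction fuel with
  | zero => intro i acc; rfl
  | succ n ih =>
    intro i acc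
    rw [replace_with_mapping_go, replace_with_mapping_alt_go]
    by_cases h : i < cs.length
    · simp only [h, dif_pos]
      have hwalk : trieWalk ch vals (cs.drop i) i 0 none
          = pvScan (pvTermVal ch vals) [] (cs.drop i) i none :=
        pvWalk_eq_scan ch vals (cs.drop i) [] i 0 none rfl
      cases hfa : (PySem.List.sorted (PySem.Dict.ofList mappings).keys
          (fun k => PySem.Str.len k) true).find?
          (fun k => PySem.Chars.startswith (cs.drop i) k.toList) with
      | none =>
        have hscan : pvScan (pvTermVal ch vals) [] (cs.drop i) i none = none := by
          refine pvScan_none _ (cs.drop i) [] i none ?_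
          intro d hd1 hdl
          simpa [hval] using pvA_none mappings (cs.drop i) hfa d hd1 hdl
        rw [hwalk, hscan]
        exact ih (i + 1) _
      | some k =>
        obtain ⟨h1, h2, h3, h4⟩ := pvA_some mappings (cs.drop i) k hnn hfa
        have hscan : pvScan (pvTermVal ch vals) [] (cs.drop i) i none
            = some (i + k.toList.length, (PySem.Dict.ofList mappings).getD k "") := by
          refine pvScan_hit _ (cs.drop i) k.toList.length [] i none _ h1 h2 ?_ ?_
          · simpa [hval] using h3
          · intro d hd hdl
            simpa [hval] using h4 d hd hdl
        rw [hwalk, hscan]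
        exact ih (i + k.toList.length) _
    · simp only [h, dif_neg, not_false_iff]

-- ===== VERDICT (by name: the statement is the Claim_ definition above) =====
theorem replace_with_mapping_spec : Claim_equal_replace_with_mapping := by
  intro input_str mappings _ hpre
  unfold Spec_replace_with_mapping
  rcases hpre with rfl | hnn
  · rfl
  · unfold replace_with_mapping replace_with_mapping_alt
    have hnn' : ∀ k' ∈ (PySem.Dict.ofList mappings).keys, k' ≠ "" := by
      intro k hkm
      rcases List.mem_map.mp (pv_mem_keys_ofList mappings k hkm) with ⟨p, hp, rfl⟩
      exact hnn p hp
    obtain ⟨-, hval⟩ := pvBuild_go (PySem.Dict.ofList mappings).items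
      [PySem.Dict.empty] [none] pvInv_init
    have hval' : ∀ s, pvTermVal
        ((PySem.Dict.ofList mappings).items.foldl
          (fun cv p => trieAddKey cv.1 cv.2 0 p.1.toList p.2) ([PySem.Dict.empty], [none])).1
        ((PySem.Dict.ofList mappings).items.foldl
          (fun cv p => trieAddKey cv.1 cv.2 0 p.1.toList p.2) ([PySem.Dict.empty], [none])).2 s
        = pvLastVal (PySem.Dict.ofList mappings).items s := by
      intro s
      rw [hval s, pvTermVal_init s]
      cases pvLastVal (PySem.Dict.ofList mappings).items s <;> rfl
    exact congrArg (fun l => String.ofList (List.flatMap String.toList l))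
      (pv_go_eq input_str.toList mappings _ _ hval' hnn' input_str.toList.length 0 [])
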